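-- pv_equiv track=rewrite | github.com/theandsea/Python-problem-solving | 0404.py | threshold_values
-- ===== SOURCE A (Python) =====
-- def map_bitstring(x):
--     """
--     takes a list of bitstrings (i.e., 0101) and
--     maps each bitstring to 0 if the number of 0s in the bitstring strictly exceeds the number of 1s.
--     Otherwise, map that bitstring to 1
--     :param x:
--     :return:
--     """
--     assert isinstance(x,list)
--     for bitstr in x:
--         assert bitstr.replace("0","").replace("1","")=="" # strictly bitstring
--
--     res={}
--     for bitstr in x:
--         if bitstr not in res.keys():
--             if len(bitstr.replace("1",""))>len(bitstr.replace("0","")): # only 0 left > only 1 left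
--                 res[bitstr]=0
--             else:
--                 res[bitstr]=1
--
--     return res
--
-- def threshold_values(x,threshold):
--     """
--     keep the bitstrings with the two most frequent 1s and set all of the rest to 0
--     If there is a tie, then use the smallest value the tied bitstrings to pick the winner.
--     :param x:
--     :param threshold:
--     :return:
--     """
--     mapnum=map_bitstring(x) # already check the format
--
--     # get the frequency
--     res={}
--     for bitstr in x:
--         if bitstr in res.keys():
--             res[bitstr] += mapnum[bitstr]
--         else:
--             res[bitstr] = 0
--             res[bitstr] += mapnum[bitstr]
--     # sort
--     freq=[]
--     sample=[]
--     for key in res.keys():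
--         freq.append(res[key])
--         sample.append(key)
--
--     z=list(zip(freq,sample))
--     z= sorted(z,key=lambda x:(-x[0],x[1]))
--     res={}
--     for i in range(len(z)):
--         if i<threshold:
--             res[z[i][1]]=1
--         else:
--             res[z[i][1]]=0
--
--     return res
-- ===== SOURCE B (Python) =====
-- def threshold_values(x, threshold):
--     # same validation as the original; then: score each unique bitstring
--     # (occurrences x label) and place it by its rank (number of dominating
--     # bitstrings) instead of sorting the whole score list.
--     assert isinstance(x, list)
--     for s in x:
--         assert s.replace("0", "").replace("1", "") == ""
--
--     counts = {}
--     for s in x: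
--         counts[s] = counts.get(s, 0) + 1
--     score = {}
--     for s, c in counts.items():
--         score[s] = c if s.count("1") >= s.count("0") else 0
--
--     keys = list(score.keys())
--     n = len(keys)
--
--     def rank(b):
--         rb = score[b]
--         r = 0
--         for c in keys:
--             if score[c] > rb or (score[c] == rb and c < b):
--                 r += 1
--         return r
--
--     ordered = [""] * n
--     for b in keys:
--         ordered[rank(b)] = b
--
--     res = {}
--     for i in range(n):
--         res[ordered[i]] = 1 if i < threshold else 0
--     return res
-- ===== Notes on version B (the rewrite author's own statement) =====
-- stated objective: alternative
-- what changed: B replaces the global sort of (frequency, bitstring) pairs by rank-by-domination: each unique bitstring's position is computed directly as the number of bitstrings that dominate it (higher score, or equal score and lexicographically smaller), and the output is assembled by placing each bitstring at its rank.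
import Mathlib
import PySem

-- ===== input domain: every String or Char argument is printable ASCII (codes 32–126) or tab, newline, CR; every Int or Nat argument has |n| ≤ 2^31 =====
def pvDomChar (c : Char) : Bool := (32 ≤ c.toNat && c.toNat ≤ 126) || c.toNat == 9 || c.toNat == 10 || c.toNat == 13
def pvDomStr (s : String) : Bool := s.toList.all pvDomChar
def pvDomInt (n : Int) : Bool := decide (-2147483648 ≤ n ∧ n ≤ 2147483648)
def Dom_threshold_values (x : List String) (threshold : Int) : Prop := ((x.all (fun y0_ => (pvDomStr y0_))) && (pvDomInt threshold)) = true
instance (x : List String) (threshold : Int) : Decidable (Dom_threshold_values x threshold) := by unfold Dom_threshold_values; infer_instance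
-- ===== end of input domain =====

-- B replaces the global sort of (frequency, bitstring) pairs by rank-by-domination
-- placement (objective: alternative; the asserts are modelled by Pre_, which admits
-- exactly the bitstring lists on which the Pythons return).

-- ===== PORT A =====
-- the asserts of map_bitstring raise AssertionError on non-bitstrings; those inputs are excluded by Pre_
def pv_mapBitstring (x : List String) : PySem.Dict String Int :=
  x.foldl (fun res b =>
    if res.contains b then res
    else if PySem.Str.len (PySem.Str.replace b "1" "") > PySem.Str.len (PySem.Str.replace b "0" "") then
      res.insert b 0
    else res.insert b 1) PySem.Dict.empty

def threshold_values (x : List String) (threshold : Int) : List (String × Int) :=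
  let mapnum := pv_mapBitstring x
  -- frequency loop; mapnum[bitstr] is always present here, ported as getD 0
  let res := x.foldl (fun d b =>
    if d.contains b then d.insert b (d.getD b 0 + mapnum.getD b 0)
    else
      let d1 := d.insert b 0
      d1.insert b (d1.getD b 0 + mapnum.getD b 0)) PySem.Dict.empty
  let freq := res.keys.foldl (fun l k => l ++ [res.getD k 0]) ([] : List Int)
  let sample := res.keys.foldl (fun l k => l ++ [k]) ([] : List String)
  let z := freq.zip sample
  let z2 := PySem.List.sorted2 z (fun p => -p.1) (fun p => p.2)
  let out := (PySem.List.pyRange 0 (z2.length : Int) 1).foldl (fun d i =>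
    d.insert (PySem.List.pyGetD z2 i (0, "")).2 (if i < threshold then (1 : Int) else 0)) PySem.Dict.empty
  out.items

-- ===== PORT B =====
def threshold_values_alt (x : List String) (threshold : Int) : List (String × Int) :=
  -- same asserts as A (AssertionError on non-bitstrings, excluded by Pre_)
  let counts := x.foldl (fun d s => d.insert s (d.getD s 0 + 1)) (PySem.Dict.empty : PySem.Dict String Int)
  let score := counts.items.foldl (fun d p =>
    d.insert p.1 (if PySem.Str.count p.1 "1" ≥ PySem.Str.count p.1 "0" then p.2 else 0))
    (PySem.Dict.empty : PySem.Dict String Int)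
  let keys := score.keys
  let n : Int := keys.length
  -- score[b] / score[c] are always present, ported as getD 0
  let rank := fun (b : String) =>
    let rb := score.getD b 0
    keys.foldl (fun r c => if score.getD c 0 > rb ∨ (score.getD c 0 = rb ∧ c < b) then r + 1 else r) (0 : Int)
  -- ordered[rank(b)] = b; rank(b) is always in range, ported with the total pySetD
  let ordered := keys.foldl (fun L b => PySem.List.pySetD L (rank b) b) (List.replicate keys.length "")
  let res := (PySem.List.pyRange 0 n 1).foldl (fun d i =>
    d.insert (PySem.List.pyGetD ordered i "") (if i < threshold then (1 : Int) else 0))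
    (PySem.Dict.empty : PySem.Dict String Int)
  res.items

-- ===== PRECONDITION & SPEC =====
-- Pre_ admits exactly the inputs where A's asserts pass (every string a bitstring);
-- elsewhere both Pythons raise AssertionError.
def Pre_threshold_values (x : List String) (threshold : Int) : Prop :=
  (x.all (fun s => s.toList.all (fun c => c == '0' || c == '1'))) = true
instance (x : List String) (threshold : Int) : Decidable (Pre_threshold_values x threshold) := by
  unfold Pre_threshold_values; infer_instance

def pvWitness_threshold_values : List String × Int := (["01", "1", "01", "0"], 2)

def Spec_threshold_values (x : List String) (threshold : Int) (out : List (String × Int)) : Prop := out = threshold_values_alt x threshold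
instance (x : List String) (threshold : Int) (out : List (String × Int)) : Decidable (Spec_threshold_values x threshold out) := by unfold Spec_threshold_values; infer_instance

-- ===== CLAIM (what is proved, stated in full; the proofs are below) =====
def Claim_equal_threshold_values : Prop := ∀ (x : List String) (threshold : Int), Dom_threshold_values x threshold → Pre_threshold_values x threshold → Spec_threshold_values x threshold (threshold_values x threshold)


-- ===== LEMMAS AND PROOFS =====

-- ---------- abbreviations used by the proofs ----------

def pvLab (s : String) : Int := if PySem.Str.count s "1" ≥ PySem.Str.count s "0" then 1 else 0

def pvScore (x : List String) (b : String) : Int := (x.count b : Int) * pvLab b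

def pvK (x : List String) : List String := PySem.Set.ofList x

def pvZ (x : List String) : List (Int × String) := (pvK x).map (fun b => (pvScore x b, b))

def pvSZ (x : List String) : List (Int × String) :=
  PySem.List.sorted2 (pvZ x) (fun p => -p.1) (fun p => p.2)

def pvS (x : List String) : List String := (pvSZ x).map (fun p => p.2)

-- Python's comparison "c dominates b" as a Bool
def pvRSb (x : List String) (c b : String) : Bool :=
  decide (pvScore x c > pvScore x b ∨ (pvScore x c = pvScore x b ∧ c < b))

-- the `before` comparison sorted2 uses for key (-freq, name)
def pvBfn : (Int × String) → (Int × String) → Bool :=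
  fun a b => decide (-a.1 < -b.1) || (!decide (-b.1 < -a.1) && decide (a.2 < b.2))

def pvMbStep (res : PySem.Dict String Int) (b : String) : PySem.Dict String Int :=
  if res.contains b then res
  else if PySem.Str.len (PySem.Str.replace b "1" "") > PySem.Str.len (PySem.Str.replace b "0" "") then
    res.insert b 0
  else res.insert b 1

-- ---------- character-level facts (A's replace-length test = B's count test) ----------

lemma pv_count_go_single (c : Char) : ∀ (fuel : Nat) (l : List Char) (acc : Nat), l.length ≤ fuel →
    PySem.Chars.count.go [c] fuel l acc = acc + l.count c := by
  intro fuel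
  induction fuel with
  | zero => intro l acc h; cases l with
    | nil => simp [PySem.Chars.count.go]
    | cons d t => simp at h
  | succ n ih => intro l acc h; cases l with
    | nil => simp [PySem.Chars.count.go]
    | cons d t =>
      rw [show PySem.Chars.count.go [c] (n+1) (d :: t) acc =
        if [c].isPrefixOf (d :: t) then PySem.Chars.count.go [c] n (List.drop [c].length (d :: t)) (acc + 1)
        else PySem.Chars.count.go [c] n t acc from rfl]
      have ht : t.length ≤ n := by simpa using h
      by_cases hdc : d = c
      · simp [List.isPrefixOf, hdc, ih t _ ht]; omega
      · have hcd : ¬ (c == d) = true := by simp [Ne.symm hdc]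
        simp [List.isPrefixOf, hcd, ih t _ ht, hdc]

lemma pv_replace_go_single (c : Char) : ∀ (fuel : Nat) (l acc : List Char), l.length ≤ fuel →
    PySem.Chars.replace.go [c] [] fuel l acc = acc.reverse ++ l.filter (fun d => !(d == c)) := by
  intro fuel
  induction fuel with
  | zero => intro l acc h; cases l with
    | nil => simp [PySem.Chars.replace.go]
    | cons d t => simp at h
  | succ n ih => intro l acc h; cases l with
    | nil => simp [PySem.Chars.replace.go]
    | cons d t =>
      rw [show PySem.Chars.replace.go [c] [] (n+1) (d :: t) acc =
        if [c].isPrefixOf (d :: t) then PySem.Chars.replace.go [c] [] n (List.drop [c].length (d :: t)) ([].reverse ++ acc)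
        else PySem.Chars.replace.go [c] [] n t (d :: acc) from rfl]
      have ht : t.length ≤ n := by simpa using h
      by_cases hdc : d = c
      · simp [List.isPrefixOf, hdc, ih t _ ht]
      · have hcd : ¬ (c == d) = true := by simp [Ne.symm hdc]
        simp [List.isPrefixOf, hcd, ih t _ ht, hdc]

lemma pv_count_one (s : String) : PySem.Str.count s "1" = s.toList.count '1' := by
  have h1 : ("1" : String).toList = ['1'] := rfl
  simp [PySem.Str.count, PySem.Chars.count, h1, pv_count_go_single]

lemma pv_count_zero (s : String) : PySem.Str.count s "0" = s.toList.count '0' := by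
  have h1 : ("0" : String).toList = ['0'] := rfl
  simp [PySem.Str.count, PySem.Chars.count, h1, pv_count_go_single]

lemma pv_lenreplace_one (s : String) : PySem.Str.len (PySem.Str.replace s "1" "") =
    ((s.toList.filter (fun d => !(d == '1'))).length : Int) := by
  have h1 : ("1" : String).toList = ['1'] := rfl
  simp [PySem.Str.replace, PySem.Chars.replace, h1, pv_replace_go_single, PySem.Str.len_eq]

lemma pv_lenreplace_zero (s : String) : PySem.Str.len (PySem.Str.replace s "0" "") =
    ((s.toList.filter (fun d => !(d == '0'))).length : Int) := by
  have h1 : ("0" : String).toList = ['0'] := rfl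
  simp [PySem.Str.replace, PySem.Chars.replace, h1, pv_replace_go_single, PySem.Str.len_eq]

lemma pv_filter_len (l : List Char) (c : Char) :
    (l.filter (fun d => !(d == c))).length = l.length - l.count c := by
  induction l with
  | nil => simp
  | cons d t ih =>
    by_cases h : d = c
    · simp [h, ih]
    · have hc : t.count c ≤ t.length := List.count_le_length
      simp [h, ih]
      omega

lemma pv_labA (s : String) :
    (if PySem.Str.len (PySem.Str.replace s "1" "") > PySem.Str.len (PySem.Str.replace s "0" "") then (0:Int) else 1)
      = pvLab s := by
  rw [pvLab, pv_lenreplace_one, pv_lenreplace_zero, pv_count_one, pv_count_zero,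
    pv_filter_len, pv_filter_len]
  have h1 : s.toList.count '1' ≤ s.toList.length := List.count_le_length
  have h0 : s.toList.count '0' ≤ s.toList.length := List.count_le_length
  split_ifs with ha hb hb <;> omega

-- ---------- A's map_bitstring dict holds pvLab at every key it contains ----------

lemma pv_mb_contains_mono (l : List String) (d : PySem.Dict String Int) (b : String)
    (h : d.contains b = true) : (l.foldl pvMbStep d).contains b = true := by
  induction l generalizing d with
  | nil => simpa using h
  | cons a t ih =>
    simp only [List.foldl_cons]
    refine ih _ ?_
    unfold pvMbStep
    split_ifs <;> simp [PySem.Dict.contains_insert, h]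

lemma pv_mb_contains (l : List String) (d : PySem.Dict String Int) (b : String) (hb : b ∈ l) :
    (l.foldl pvMbStep d).contains b = true := by
  induction l generalizing d with
  | nil => simp at hb
  | cons a t ih =>
    simp only [List.foldl_cons]
    rcases List.mem_cons.mp hb with hba | hbt
    · subst hba
      refine pv_mb_contains_mono t _ b ?_
      unfold pvMbStep
      split_ifs with h1 <;> simp [h1]
    · exact ih (pvMbStep d a) hbt

lemma pv_mb_getD (l : List String) (d : PySem.Dict String Int)
    (hd : ∀ b, d.contains b = true → d.getD b 0 = pvLab b) :
    ∀ b, (l.foldl pvMbStep d).contains b = true → (l.foldl pvMbStep d).getD b 0 = pvLab b := by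
  induction l generalizing d with
  | nil => simpa using hd
  | cons a t ih =>
    simp only [List.foldl_cons]
    refine ih _ ?_
    intro b hb
    by_cases h1 : d.contains a
    · simp only [pvMbStep, h1, if_true] at hb ⊢
      exact hd b hb
    · by_cases h2 : PySem.Str.len (PySem.Str.replace a "1" "") > PySem.Str.len (PySem.Str.replace a "0" "")
      · simp only [pvMbStep, h1, if_pos h2, Bool.false_eq_true, if_false] at hb ⊢
        by_cases hba : b = a
        · subst hba
          rw [PySem.Dict.getD_insert_self, ← pv_labA b, if_pos h2]
        · rw [PySem.Dict.getD_insert_of_ne _ _ _ hba]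
          rw [PySem.Dict.contains_insert] at hb
          simp [hba] at hb
          exact hd b hb
      · simp only [pvMbStep, h1, if_neg h2, Bool.false_eq_true, if_false] at hb ⊢
        by_cases hba : b = a
        · subst hba
          rw [PySem.Dict.getD_insert_self, ← pv_labA b, if_neg h2]
        · rw [PySem.Dict.getD_insert_of_ne _ _ _ hba]
          rw [PySem.Dict.contains_insert] at hb
          simp [hba] at hb
          exact hd b hb

lemma pv_mapnum_getD (x : List String) (b : String) (hb : b ∈ x) :
    (pv_mapBitstring x).getD b 0 = pvLab b := by
  have hc : (x.foldl pvMbStep PySem.Dict.empty).contains b = true :=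
    pv_mb_contains x PySem.Dict.empty b hb
  exact pv_mb_getD x PySem.Dict.empty
    (by intro b hb; simp [PySem.Dict.contains_empty] at hb) b hc

-- ---------- A's frequency dict ----------

lemma pv_freqStep_eq (m : PySem.Dict String Int) :
    (fun (d : PySem.Dict String Int) (b : String) =>
      if d.contains b then d.insert b (d.getD b 0 + m.getD b 0)
      else
        let d1 := d.insert b 0
        d1.insert b (d1.getD b 0 + m.getD b 0))
    = fun d b => d.insert b ((if d.contains b then d.getD b 0 else 0) + m.getD b 0) := by
  funext d b
  by_cases h : d.contains b
  · simp [h]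
  · simp only [h, Bool.false_eq_true, if_false]
    rw [PySem.Dict.insert_insert_self, PySem.Dict.getD_insert_self]

lemma pv_freq_keys (m : PySem.Dict String Int) (l : List String) :
    (l.foldl (fun d b => d.insert b ((if d.contains b then d.getD b 0 else 0) + m.getD b 0))
      PySem.Dict.empty).keys = pvK l := by
  rw [PySem.Dict.keys_foldl_insert]
  rw [show (PySem.Dict.empty : PySem.Dict String Int).keys = PySem.Set.empty from rfl,
    PySem.Set.update_empty]
  rfl

lemma pv_freq_getD (X : List String) : ∀ (l : List String), (∀ s ∈ l, s ∈ X) → ∀ b,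
    (l.foldl (fun d b => d.insert b ((if d.contains b then d.getD b 0 else 0) + (pv_mapBitstring X).getD b 0))
      PySem.Dict.empty).getD b 0 = (l.count b : Int) * pvLab b := by
  intro l
  induction l using List.reverseRecOn with
  | nil => intro _ b; simp [PySem.Dict.getD_empty]
  | append_singleton l a ih =>
    intro hsub b
    have hsub' : ∀ s ∈ l, s ∈ X := fun s hs => hsub s (List.mem_append_left _ hs)
    have ha : a ∈ X := hsub a (List.mem_append_right _ (List.mem_singleton_self a))
    rw [List.foldl_append, List.foldl_cons, List.foldl_nil]
    set F := l.foldl (fun d b => d.insert b ((if d.contains b then d.getD b 0 else 0) + (pv_mapBitstring X).getD b 0))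
      PySem.Dict.empty with hF
    have hkeys : F.contains a = decide (a ∈ pvK l) := by
      rw [PySem.Dict.contains_eq_decide_mem_keys, hF, pv_freq_keys]
    by_cases hba : b = a
    · subst hba
      rw [PySem.Dict.getD_insert_self, pv_mapnum_getD X b ha, hkeys]
      by_cases hmem : b ∈ l
      · have : b ∈ pvK l := by simp [pvK, PySem.Set.mem_ofList, hmem]
        rw [if_pos (by simpa using this), ih hsub' b]
        have : (l ++ [b]).count b = l.count b + 1 := by simp
        rw [this]
        push_cast; ring
      · have : ¬ b ∈ pvK l := by simp [pvK, PySem.Set.mem_ofList, hmem]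
        rw [if_neg (by simpa using this)]
        have hc0 : l.count b = 0 := List.count_eq_zero_of_not_mem hmem
        have : (l ++ [b]).count b = 1 := by simp [hc0]
        rw [this]
        push_cast; ring
    · rw [PySem.Dict.getD_insert_of_ne _ _ _ hba, ih hsub' b]
      have : (l ++ [a]).count b = l.count b := by simp [Ne.symm hba]
      rw [this]

-- A's zipped (freq, sample) list is pvZ
-- ---------- generic facts about PySem's insertion sort and rank placement ----------

lemma pv_insertBy_pairwise {α : Type} (p : α → α → Bool)
    (htrans : ∀ a b c, p a b = true → p b c = true → p a c = true)
    (x : α) (ys : List α) (hpw : ys.Pairwise (p · · = true))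
    (htot : ∀ y ∈ ys, p x y = true ∨ p y x = true)
    (hnb : ∀ y ∈ ys, ¬(p x y = true ∧ p y x = true)) :
    (PySem.List.insertBy p x ys).Pairwise (p · · = true) := by
  induction ys with
  | nil => simp [PySem.List.insertBy]
  | cons y t ih =>
    rw [show PySem.List.insertBy p x (y :: t) =
      if p x y then x :: y :: t else y :: PySem.List.insertBy p x t from rfl]
    by_cases hxy : p x y = true
    · rw [if_pos hxy]
      refine List.Pairwise.cons ?_ hpw
      intro z hz
      rcases List.mem_cons.mp hz with rfl | hzt
      · exact hxy
      · exact htrans x y z hxy (List.rel_of_pairwise_cons hpw hzt)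
    · rw [if_neg (by simpa using hxy)]
      have hyx : p y x = true := by
        rcases htot y (List.mem_cons_self) with h | h
        · exact absurd h hxy
        · exact h
      refine List.Pairwise.cons ?_ ?_
      · intro z hz
        rcases (PySem.List.insertBy_mem_iff p x z t).mp hz with rfl | hzt
        · exact hyx
        · exact List.rel_of_pairwise_cons hpw hzt
      · exact ih (List.Pairwise.of_cons hpw)
          (fun z hz => htot z (List.mem_cons_of_mem _ hz))
          (fun z hz => hnb z (List.mem_cons_of_mem _ hz))

lemma pv_sortLoop {α : Type} (p : α → α → Bool)
    (htrans : ∀ a b c, p a b = true → p b c = true → p a c = true)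
    (hnb : ∀ a b, ¬(p a b = true ∧ p b a = true)) :
    ∀ (l : List α), l.Nodup → (∀ a ∈ l, ∀ b ∈ l, a ≠ b → p a b = true ∨ p b a = true) →
    (l.foldl (fun acc x => PySem.List.insertBy p x acc) []).Pairwise (p · · = true) ∧
    (l.foldl (fun acc x => PySem.List.insertBy p x acc) []).Perm l := by
  intro l
  induction l using List.reverseRecOn with
  | nil => simp
  | append_singleton l a ih =>
    intro hnd htot
    have hnd' : l.Nodup := hnd.of_append_left
    have hna : a ∉ l := by
      have h2 : (a :: l).Nodup := (List.perm_append_singleton a l).nodup hnd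
      exact (List.nodup_cons.mp h2).1
    have htot' : ∀ b ∈ l, ∀ c ∈ l, b ≠ c → p b c = true ∨ p c b = true :=
      fun b hb c hc => htot b (List.mem_append_left _ hb) c (List.mem_append_left _ hc)
    obtain ⟨hpw, hperm⟩ := ih hnd' htot'
    rw [List.foldl_append, List.foldl_cons, List.foldl_nil]
    constructor
    · refine pv_insertBy_pairwise p htrans a _ hpw ?_ ?_
      · intro y hy
        have hyl : y ∈ l := hperm.mem_iff.mp hy
        exact htot a (List.mem_append_right _ (List.mem_singleton_self a)) y
          (List.mem_append_left _ hyl) (fun h => hna (h ▸ hyl))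
      · intro y _; exact hnb a y
    · exact ((PySem.List.insertBy_perm p a _).trans (hperm.cons a)).trans
        (List.perm_append_singleton a l).symm

lemma pv_countP_rank {α : Type} (p : α → α → Bool) (hnb : ∀ a b, ¬(p a b = true ∧ p b a = true)) :
    ∀ (S : List α), S.Pairwise (p · · = true) → ∀ (i : Nat) (h : i < S.length),
    S.countP (fun c => p c (S[i])) = i := by
  intro S
  induction S with
  | nil => intro _ i h; simp at h
  | cons a T ih =>
    intro hpw i h
    cases i with
    | zero =>
      simp only [List.getElem_cons_zero, List.countP_cons]
      have hpa : p a a ≠ true := fun hh => hnb a a ⟨hh, hh⟩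
      have hT : T.countP (fun c => p c a) = 0 := by
        rw [List.countP_eq_zero]
        intro c hc
        have := List.rel_of_pairwise_cons hpw hc
        simp only [Bool.not_eq_true]
        by_contra hcc
        exact hnb a c ⟨this, by simpa using hcc⟩
      simp [hT, hpa]
    | succ i =>
      have hi' : i < T.length := by simpa using h
      simp only [List.getElem_cons_succ, List.countP_cons]
      have hmem : T[i]'hi' ∈ T := List.getElem_mem _
      have hpa : p a (T[i]'hi') = true := List.rel_of_pairwise_cons hpw hmem
      rw [ih (List.Pairwise.of_cons hpw) i hi']
      simp [hpa]

lemma pv_rank_unique {α : Type} (p : α → α → Bool) (hnb : ∀ a b, ¬(p a b = true ∧ p b a = true))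
    (S : List α) (hpw : S.Pairwise (p · · = true)) (c : α) (hc : c ∈ S) (i : Nat) (h : i < S.length)
    (hr : S.countP (fun d => p d c) = i) : c = S[i] := by
  obtain ⟨j, hj, rfl⟩ := List.mem_iff_getElem.mp hc
  have := pv_countP_rank p hnb S hpw j hj
  have hji : j = i := by rw [this] at hr; exact hr
  subst hji; rfl

lemma pv_foldl_set_length {α : Type} (K : List α) (idx : α → Nat) (L0 : List α) :
    (K.foldl (fun L c => L.set (idx c) c) L0).length = L0.length := by
  induction K generalizing L0 with
  | nil => rfl
  | cons a t ih => simp [ih]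

lemma pv_foldl_set_untouched {α : Type} (K : List α) (idx : α → Nat) (L0 : List α) (i : Nat)
    (h : ∀ c ∈ K, idx c ≠ i) : (K.foldl (fun L c => L.set (idx c) c) L0)[i]? = L0[i]? := by
  induction K generalizing L0 with
  | nil => rfl
  | cons a t ih =>
    rw [List.foldl_cons, ih _ (fun c hc => h c (List.mem_cons_of_mem _ hc)),
      List.getElem?_set_ne (h a List.mem_cons_self)]

lemma pv_foldl_set_hit {α : Type} (K : List α) (idx : α → Nat) :
    ∀ (L0 : List α) (i : Nat) (b : α), K.Nodup → b ∈ K → idx b = i → i < L0.length →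
    (∀ c ∈ K, idx c = i → c = b) →
    (K.foldl (fun L c => L.set (idx c) c) L0)[i]? = some b := by
  induction K with
  | nil => intro _ _ _ _ hb; simp at hb
  | cons a t ih =>
    intro L0 i b hnd hb hidx hi huniq
    rw [List.foldl_cons]
    by_cases hab : a = b
    · subst hab
      have hnt : a ∉ t := (List.nodup_cons.mp hnd).1
      rw [pv_foldl_set_untouched t idx _ i ?_]
      · rw [hidx, List.getElem?_set_self (by simpa using hi)]
      · intro c hc hci
        have := huniq c (List.mem_cons_of_mem _ hc) hci
        exact absurd (this ▸ hc) hnt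
    · have hbt : b ∈ t := by
        rcases List.mem_cons.mp hb with rfl | h
        · exact absurd rfl hab
        · exact h
      exact ih _ i b (List.nodup_cons.mp hnd).2 hbt hidx (by simpa using hi)
        (fun c hc => huniq c (List.mem_cons_of_mem _ hc))

-- ---------- the comparison pvBfn : transitive, asymmetric, total on distinct names ----------

lemma pv_bfn_trans : ∀ a b c, pvBfn a b = true → pvBfn b c = true → pvBfn a c = true := by
  intro a b c hab hbc
  simp only [pvBfn, Bool.or_eq_true, Bool.and_eq_true, Bool.not_eq_true',
    decide_eq_true_eq, decide_eq_false_iff_not] at hab hbc ⊢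
  rcases hab with h1 | ⟨h2, h3⟩ <;> rcases hbc with h4 | ⟨h5, h6⟩
  · left; omega
  · left; omega
  · left; omega
  · right; exact ⟨by omega, lt_trans h3 h6⟩

lemma pv_bfn_nb : ∀ a b, ¬(pvBfn a b = true ∧ pvBfn b a = true) := by
  intro a b ⟨hab, hba⟩
  simp only [pvBfn, Bool.or_eq_true, Bool.and_eq_true, Bool.not_eq_true',
    decide_eq_true_eq, decide_eq_false_iff_not] at hab hba
  rcases hab with h1 | ⟨h2, h3⟩ <;> rcases hba with h4 | ⟨h5, h6⟩
  · omega
  · omega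
  · omega
  · exact absurd h6 (lt_asymm h3)

lemma pv_bfn_total (a b : Int × String) (h : a.2 ≠ b.2) : pvBfn a b = true ∨ pvBfn b a = true := by
  simp only [pvBfn, Bool.or_eq_true, Bool.and_eq_true, Bool.not_eq_true',
    decide_eq_true_eq, decide_eq_false_iff_not]
  by_cases h1 : -a.1 < -b.1
  · exact Or.inl (Or.inl h1)
  · by_cases h2 : -b.1 < -a.1
    · exact Or.inr (Or.inl h2)
    · rcases lt_or_gt_of_ne h with hs | hs
      · exact Or.inl (Or.inr ⟨h2, hs⟩)
      · exact Or.inr (Or.inr ⟨h1, hs⟩)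

lemma pv_bfn_z (x : List String) (u v : String) :
    pvBfn (pvScore x u, u) (pvScore x v, v) = pvRSb x u v := by
  rw [Bool.eq_iff_iff]
  simp only [pvBfn, pvRSb, Bool.or_eq_true, Bool.and_eq_true, Bool.not_eq_true',
    decide_eq_true_eq, decide_eq_false_iff_not]
  constructor
  · rintro (h | ⟨h1, h2⟩)
    · exact Or.inl (neg_lt_neg_iff.mp h)
    · by_cases he : pvScore x u = pvScore x v
      · exact Or.inr ⟨he, h2⟩
      · rw [neg_lt_neg_iff] at h1
        exact Or.inl (lt_of_le_of_ne (not_lt.mp h1) (Ne.symm he))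
  · rintro (h | ⟨h1, h2⟩)
    · exact Or.inl (neg_lt_neg_iff.mpr h)
    · refine Or.inr ⟨?_, h2⟩
      rw [neg_lt_neg_iff, h1]
      exact lt_irrefl _

lemma pv_rsb_nb (x : List String) : ∀ u v, ¬(pvRSb x u v = true ∧ pvRSb x v u = true) := by
  intro u v ⟨huv, hvu⟩
  simp only [pvRSb, decide_eq_true_eq] at huv hvu
  rcases huv with h1 | ⟨h2, h3⟩ <;> rcases hvu with h4 | ⟨h5, h6⟩
  · omega
  · omega
  · omega
  · exact absurd h6 (lt_asymm h3)

lemma pv_sorted2_eq (z : List (Int × String)) :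
    PySem.List.sorted2 z (fun p => -p.1) (fun p => p.2) =
      z.foldl (fun acc q => PySem.List.insertBy pvBfn q acc) [] := rfl

lemma pv_z_shape (x : List String) (p : Int × String) (hp : p ∈ pvZ x) :
    p = (pvScore x p.2, p.2) := by
  obtain ⟨b, _, rfl⟩ := List.mem_map.mp hp
  rfl

lemma pv_z_nodup (x : List String) : (pvZ x).Nodup := by
  refine List.Nodup.map ?_ (PySem.Set.nodup_ofList x)
  intro u v h
  simpa using congrArg Prod.snd h

lemma pv_SZ_facts (x : List String) :
    (pvSZ x).Pairwise (pvBfn · · = true) ∧ (pvSZ x).Perm (pvZ x) := by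
  rw [pvSZ, pv_sorted2_eq]
  refine pv_sortLoop pvBfn pv_bfn_trans pv_bfn_nb (pvZ x) (pv_z_nodup x) ?_
  intro a ha b hb hne
  refine pv_bfn_total a b ?_
  intro h2
  refine hne ?_
  rw [pv_z_shape x a ha, pv_z_shape x b hb, h2]

lemma pv_S_perm (x : List String) : (pvS x).Perm (pvK x) := by
  have h := ((pv_SZ_facts x).2).map (fun p : Int × String => p.2)
  rw [pvS]
  refine h.trans ?_
  rw [pvZ, List.map_map]
  have hcomp : ((fun p : Int × String => p.2) ∘ fun b => (pvScore x b, b)) = id := rfl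
  rw [hcomp, List.map_id]

lemma pv_S_length (x : List String) : (pvS x).length = (pvK x).length :=
  (pv_S_perm x).length_eq

lemma pv_S_nodup (x : List String) : (pvS x).Nodup :=
  (pv_S_perm x).symm.nodup (PySem.Set.nodup_ofList x)

lemma pv_S_pairwise (x : List String) : (pvS x).Pairwise (fun u v => pvRSb x u v = true) := by
  rw [pvS, List.pairwise_map]
  refine List.Pairwise.imp_of_mem ?_ (pv_SZ_facts x).1
  intro p q hp hq hpq
  have hp' := pv_z_shape x p ((pv_SZ_facts x).2.mem_iff.mp hp)
  have hq' := pv_z_shape x q ((pv_SZ_facts x).2.mem_iff.mp hq)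
  rw [hp', hq', pv_bfn_z] at hpq
  exact hpq

-- rank of the i-th sorted element is i, and ranks identify elements
def pvIdx (x : List String) (b : String) : Nat := (pvK x).countP (fun c => pvRSb x c b)

lemma pv_idx_eq_countP_S (x : List String) (b : String) :
    pvIdx x b = (pvS x).countP (fun c => pvRSb x c b) := by
  rw [pvIdx]
  exact (List.Perm.countP_eq _ (pv_S_perm x)).symm

lemma pv_idx_S (x : List String) (i : Nat) (hi : i < (pvS x).length) :
    pvIdx x ((pvS x)[i]) = i := by
  rw [pv_idx_eq_countP_S]
  exact pv_countP_rank (fun u v => pvRSb x u v) (pv_rsb_nb x) (pvS x) (pv_S_pairwise x) i hi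

lemma pv_idx_unique (x : List String) (c : String) (hc : c ∈ pvK x) (i : Nat)
    (hi : i < (pvS x).length) (hr : pvIdx x c = i) : c = (pvS x)[i] := by
  rw [pv_idx_eq_countP_S] at hr
  exact pv_rank_unique (fun u v => pvRSb x u v) (pv_rsb_nb x) (pvS x) (pv_S_pairwise x)
    c ((pv_S_perm x).mem_iff.mpr hc) i hi hr

-- ---------- characterization of port A ----------

lemma pv_A_eq (x : List String) (t : Int) :
    threshold_values x t = (PySem.List.pyRange 0 ((pvS x).length : Int) 1).map
      (fun i => (PySem.List.pyGetD (pvS x) i "", if i < t then (1:Int) else 0)) := by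
  simp only [threshold_values]
  rw [pv_freqStep_eq]
  set F := x.foldl (fun (d : PySem.Dict String Int) b =>
    d.insert b ((if d.contains b then d.getD b 0 else 0) + (pv_mapBitstring x).getD b 0))
    PySem.Dict.empty with hF
  have hz : (List.foldl (fun l k => l ++ [F.getD k 0]) [] F.keys).zip
      (List.foldl (fun l k => l ++ [k]) [] F.keys) = pvZ x := by
    rw [PySem.List.foldl_append_singleton_eq_map, PySem.List.foldl_append_singleton_eq_map]
    simp only [List.nil_append]
    have hkeys : F.keys = pvK x := pv_freq_keys _ x
    have h2 : F.keys.map (fun k => k) = F.keys.map id := rfl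
    rw [h2, List.map_id]
    have h3 : F.keys = F.keys.map id := (List.map_id _).symm
    nth_rewrite 2 [h3]
    rw [List.zip_map']
    rw [hkeys, pvZ]
    refine List.map_congr_left ?_
    intro b _
    simp only [id]
    rw [hF, pv_freq_getD x x (fun s hs => hs) b]
    rfl
  rw [hz]
  rw [show PySem.List.sorted2 (pvZ x) (fun p => -p.1) (fun p : Int × String => p.2) = pvSZ x from rfl]
  have hmapk : (PySem.List.pyRange 0 ((pvSZ x).length : Int) 1).map
      (fun i => (PySem.List.pyGetD (pvSZ x) i ((0:Int), "")).2) = pvS x := by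
    have h1 : (fun i => (PySem.List.pyGetD (pvSZ x) i ((0:Int),"")).2)
        = ((fun p : Int × String => p.2) ∘ (fun j => PySem.List.pyGetD (pvSZ x) j ((0:Int),""))) := rfl
    rw [h1, ← List.map_map]
    rw [PySem.List.map_pyGetD_pyRange_zero']
    rfl
  rw [PySem.Dict.items_foldl_insert_fresh (PySem.List.pyRange 0 ((pvSZ x).length : Int) 1)
    (fun i => (PySem.List.pyGetD (pvSZ x) i ((0:Int), "")).2)
    (fun i => if i < t then (1:Int) else 0) PySem.Dict.empty
    (fun a _ => PySem.Dict.contains_empty _) (by rw [hmapk]; exact pv_S_nodup x)]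
  have hlen : ((pvSZ x).length : Int) = ((pvS x).length : Int) := by rw [pvS, List.length_map]
  rw [hlen]
  rw [show (PySem.Dict.empty : PySem.Dict String Int).items = [] from rfl, List.nil_append]
  refine List.map_congr_left ?_
  intro i _
  have h4 : PySem.List.pyGetD (pvS x) i "" = (PySem.List.pyGetD (pvSZ x) i ((0:Int),"")).2 := by
    rw [pvS]
    exact PySem.List.pyGetD_map (fun p : Int × String => p.2) (pvSZ x) i ((0:Int),"")
  rw [h4]

-- ---------- characterization of port B ----------

lemma pv_B_eq (x : List String) (t : Int) :
    threshold_values_alt x t = (PySem.List.pyRange 0 ((pvS x).length : Int) 1).map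
      (fun i => (PySem.List.pyGetD (pvS x) i "", if i < t then (1:Int) else 0)) := by
  simp only [threshold_values_alt]
  set cD := x.foldl (fun (d : PySem.Dict String Int) s => d.insert s (d.getD s 0 + 1))
    PySem.Dict.empty with hcD
  set sD := cD.items.foldl (fun (d : PySem.Dict String Int) p =>
    d.insert p.1 (if PySem.Str.count p.1 "1" ≥ PySem.Str.count p.1 "0" then p.2 else 0))
    PySem.Dict.empty with hsD
  have hcKeys : cD.keys = pvK x := by
    rw [hcD, PySem.Dict.keys_foldl_insert,
      show (PySem.Dict.empty : PySem.Dict String Int).keys = PySem.Set.empty from rfl,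
      PySem.Set.update_empty]
    rfl
  have hcNodup : cD.keys.Nodup := by rw [hcKeys]; exact PySem.Set.nodup_ofList x
  have hcGetD : ∀ b, cD.getD b 0 = (x.count b : Int) := by
    intro b
    rw [hcD, PySem.Dict.getD_foldl_insert_add_one]
    simp [PySem.Dict.getD_empty]
  have hcItems : cD.items = (pvK x).map (fun b => (b, (x.count b : Int))) := by
    rw [PySem.Dict.items_eq_map_keys cD hcNodup 0, hcKeys]
    exact List.map_congr_left (fun b _ => by rw [hcGetD b])
  have hsItems : sD.items = (pvK x).map (fun b => (b, pvScore x b)) := by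
    rw [hsD, PySem.Dict.items_foldl_insert_fresh cD.items (fun p => p.1)
      (fun p => if PySem.Str.count p.1 "1" ≥ PySem.Str.count p.1 "0" then p.2 else 0)
      PySem.Dict.empty (fun a _ => PySem.Dict.contains_empty _)
      (by rw [show cD.items.map (fun p => p.1) = cD.keys from rfl]; exact hcNodup)]
    rw [show (PySem.Dict.empty : PySem.Dict String Int).items = [] from rfl, List.nil_append,
      hcItems, List.map_map]
    refine List.map_congr_left ?_
    intro b _
    simp only [Function.comp]
    rw [pvScore, pvLab]
    split_ifs with h
    · rw [mul_one]
    · rw [mul_zero]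
  have hsKeys : sD.keys = pvK x := by
    rw [show sD.keys = sD.items.map (fun p => p.1) from rfl, hsItems, List.map_map]
    rw [show ((fun p : String × Int => p.1) ∘ fun b => (b, pvScore x b)) = id from rfl, List.map_id]
  have hsNodup : sD.keys.Nodup := by rw [hsKeys]; exact PySem.Set.nodup_ofList x
  have hsGetD : ∀ b ∈ pvK x, sD.getD b 0 = pvScore x b := by
    intro b hb
    exact PySem.Dict.getD_of_mem_items sD
      (by rw [hsItems]; exact List.mem_map_of_mem hb) hsNodup 0
  -- turn the rank fold into a countP-index and pySetD into set
  have hOrdFun : (fun (L : List String) (b : String) => PySem.List.pySetD L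
      (List.foldl (fun r c =>
        if sD.getD c 0 > sD.getD b 0 ∨ (sD.getD c 0 = sD.getD b 0 ∧ c < b) then r + 1 else r)
        0 sD.keys) b)
      = fun L b => L.set (sD.keys.countP (fun c =>
          decide (sD.getD c 0 > sD.getD b 0 ∨ (sD.getD c 0 = sD.getD b 0 ∧ c < b)))) b := by
    funext L b
    have hc : (fun (r : Int) (c : String) =>
        if sD.getD c 0 > sD.getD b 0 ∨ (sD.getD c 0 = sD.getD b 0 ∧ c < b) then r + 1 else r)
        = fun r c => if (fun c => decide (sD.getD c 0 > sD.getD b 0 ∨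
            (sD.getD c 0 = sD.getD b 0 ∧ c < b))) c = true then r + 1 else r := by
      funext r c
      rcases Decidable.em (sD.getD c 0 > sD.getD b 0 ∨ (sD.getD c 0 = sD.getD b 0 ∧ c < b)) with h | h
      · rw [if_pos h, if_pos (by simpa using h)]
      · rw [if_neg h, if_neg (by simpa using h)]
    rw [hc, PySem.List.foldl_count_if, zero_add, PySem.List.pySetD_natCast]
  rw [hOrdFun, hsKeys]
  have hIdx : ∀ b ∈ pvK x, (pvK x).countP (fun c =>
      decide (sD.getD c 0 > sD.getD b 0 ∨ (sD.getD c 0 = sD.getD b 0 ∧ c < b))) = pvIdx x b := by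
    intro b hb
    rw [pvIdx]
    refine List.countP_congr ?_
    intro c hc
    simp only [decide_eq_true_eq, pvRSb, hsGetD c hc, hsGetD b hb]
  have hOrd : (pvK x).foldl (fun L b => L.set ((pvK x).countP (fun c =>
      decide (sD.getD c 0 > sD.getD b 0 ∨ (sD.getD c 0 = sD.getD b 0 ∧ c < b)))) b)
      (List.replicate (pvK x).length "") = pvS x := by
    refine List.ext_getElem? ?_
    intro i
    have hlenL : ((pvK x).foldl (fun L b => L.set ((pvK x).countP (fun c =>
        decide (sD.getD c 0 > sD.getD b 0 ∨ (sD.getD c 0 = sD.getD b 0 ∧ c < b)))) b)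
        (List.replicate (pvK x).length "")).length = (pvK x).length := by
      rw [pv_foldl_set_length, List.length_replicate]
    by_cases hi : i < (pvS x).length
    · have hiK : i < (pvK x).length := by rw [← pv_S_length x]; exact hi
      have hbK : (pvS x)[i] ∈ pvK x := (pv_S_perm x).mem_iff.mp (List.getElem_mem _)
      rw [pv_foldl_set_hit (pvK x) _ _ i ((pvS x)[i]) (PySem.Set.nodup_ofList x) hbK
        (by rw [hIdx _ hbK]; exact pv_idx_S x i hi)
        (by rw [List.length_replicate]; exact hiK)
        (fun c hc hci => pv_idx_unique x c hc i hi (by rw [← hIdx c hc]; exact hci))]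
      rw [List.getElem?_eq_getElem hi]
    · rw [List.getElem?_eq_none (by rw [hlenL, ← pv_S_length x]; omega),
        List.getElem?_eq_none (by omega)]
  rw [hOrd]
  rw [show ((pvK x).length : Int) = ((pvS x).length : Int) from by rw [pv_S_length]]
  rw [PySem.Dict.items_foldl_insert_fresh (PySem.List.pyRange 0 ((pvS x).length : Int) 1)
    (fun i => PySem.List.pyGetD (pvS x) i "") (fun i => if i < t then (1:Int) else 0)
    PySem.Dict.empty (fun a _ => PySem.Dict.contains_empty _)
    (by rw [PySem.List.map_pyGetD_pyRange_zero']; exact pv_S_nodup x)]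
  rw [show (PySem.Dict.empty : PySem.Dict String Int).items = [] from rfl, List.nil_append]

-- ===== VERDICT (by name: the statement is the Claim_ definition above) =====
theorem threshold_values_spec : Claim_equal_threshold_values := by
  intro x t _ _
  unfold Spec_threshold_values
  rw [pv_A_eq, pv_B_eq]
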